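-- pv_equiv track=rewrite | github.com/gnikolaropoulos/AdventOfCode2023 | day13/main.py | is_vertically_symmetric
-- ===== SOURCE A (Python) =====
-- def is_vertically_symmetric(grid, x, smudges):
--     for i in range(min(x + 1, len(grid[0]) - x - 1)):
--         for y in range(len(grid)):
--             if grid[y][x - i] != grid[y][x + 1 + i]:
--                 if smudges > 0:
--                     smudges -= 1
--                 else:
--                     return False
--     return smudges == 0
-- ===== SOURCE B (Python) =====
-- def is_vertically_symmetric(grid, x, smudges):
--     if grid and 0 <= x < len(grid[0]) - 1:
--         cols = ["".join(c) for c in zip(*grid)]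
--         diff = sum(a != b
--                    for lc, rc in zip(cols[:x + 1][::-1], cols[x + 1:])
--                    for a, b in zip(lc, rc))
--     else:
--         diff = 0
--     return diff == smudges
-- ===== Notes on version B (the rewrite author's own statement) =====
-- stated objective: alternative
-- what changed: B transposes the grid into column strings (zip(*grid)) and folds it at the axis, summing character mismatches between each left column (reversed order) and its mirrored right column, instead of A's stateful cell-by-cell double loop with an early exit and a decrementing budget.
-- outside the precondition, e.g. on is_vertically_symmetric(['ab', 'a'], 0, 0): A returns False, B returns True; on is_vertically_symmetric([], 0, 0): A raises IndexError, B returns True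
import Mathlib
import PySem

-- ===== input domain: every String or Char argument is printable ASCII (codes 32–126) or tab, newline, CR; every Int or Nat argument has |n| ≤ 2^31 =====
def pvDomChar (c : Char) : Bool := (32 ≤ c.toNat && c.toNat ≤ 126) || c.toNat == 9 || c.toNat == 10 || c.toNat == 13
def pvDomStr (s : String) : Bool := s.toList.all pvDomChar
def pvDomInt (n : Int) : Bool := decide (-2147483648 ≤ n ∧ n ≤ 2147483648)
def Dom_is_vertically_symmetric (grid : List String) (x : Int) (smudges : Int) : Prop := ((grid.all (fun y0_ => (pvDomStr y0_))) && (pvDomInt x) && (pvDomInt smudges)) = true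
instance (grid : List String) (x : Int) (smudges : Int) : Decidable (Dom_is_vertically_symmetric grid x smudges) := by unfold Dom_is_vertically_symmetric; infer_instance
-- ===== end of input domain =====

-- B replaces A's stateful cell-by-cell double loop (early exit, decrementing budget) by a
-- transpose-and-fold: it turns the grid into column strings, folds them at the axis, sums the
-- character mismatches of the paired columns and compares with the budget ("alternative").

-- ===== PORT A =====
-- grid[y][x-i] != grid[y][x+1+i]; Option Char equality (under Pre_ both indices are in range)
def avsMismatch (row : String) (x i : Int) : Bool :=
  PySem.Str.pyGet? row (x - i) != PySem.Str.pyGet? row (x + 1 + i)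

-- inner 'for y in range(len(grid))' loop of A: none = 'return False'
def avsInner (x i : Int) : List String → Int → Option Int
  | [], s => some s
  | row :: rest, s =>
    if avsMismatch row x i then
      if s > 0 then avsInner x i rest (s - 1) else none
    else avsInner x i rest s

-- outer 'for i in range(...)' loop of A
def avsOuter (grid : List String) (x : Int) : List Int → Int → Option Int
  | [], s => some s
  | i :: is, s => (avsInner x i grid s).bind (fun s' => avsOuter grid x is s')

def is_vertically_symmetric (grid : List String) (x : Int) (smudges : Int) : Bool :=
  -- smudges is the loop's mutable budget, threaded through avsInner/avsOuter
  let n : Int := min (x + 1) (((grid.headD "").length : Int) - x - 1)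
  match avsOuter grid x (PySem.List.pyRange 0 n 1) smudges with
  | none => false
  | some s => s == 0

-- ===== PORT B =====
-- termination helper for bvsCols (cited in its decreasing_by)
theorem bvsColsTermination (rows : List (List Char)) (h2 : ∀ r ∈ rows, r ≠ []) :
    ((rows.map List.tail).map List.length).sum < (rows.map List.length).sum ∨ rows = [] := by
  cases rows with
  | nil => exact Or.inr rfl
  | cons r rs =>
    refine Or.inl ?_
    have hr : r ≠ [] := h2 r (List.mem_cons_self ..)
    have htail : ((rs.map List.tail).map List.length).sum ≤ (rs.map List.length).sum := by
      simp only [List.map_map]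
      exact List.sum_le_sum (fun t _ => by simp [List.length_tail])
    have : r.tail.length < r.length := by
      cases r with | nil => exact absurd rfl hr | cons a t => simp
    simp only [List.map_cons, List.sum_cons]
    omega

-- zip(*grid): transpose truncating to the shortest row
def bvsCols (rows : List (List Char)) : List (List Char) :=
  if h : rows = [] ∨ rows.any (fun r => r.isEmpty) then []
  else (rows.map (fun r => r.headD ' ')) :: bvsCols (rows.map List.tail)
termination_by (rows.map List.length).sum
decreasing_by
  rcases bvsColsTermination rows (by
    intro r hr
    by_contra hne
    exact h (Or.inr (List.any_eq_true.mpr ⟨r, hr, by simpa using hne⟩))) with hlt | hnil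
  · simpa using hlt
  · exact absurd hnil (fun e => h (Or.inl e))

-- sum(a != b for a, b in zip(lc, rc)): character mismatches between two columns
def bvsHam (u v : List Char) : Nat := ((u.zip v).filter (fun p => p.1 ≠ p.2)).length

def is_vertically_symmetric_alt (grid : List String) (x : Int) (smudges : Int) : Bool :=
  let diff : Nat :=
    if grid ≠ [] ∧ 0 ≤ x ∧ x < ((grid.headD "").length : Int) - 1 then
      let cols := bvsCols (grid.map String.toList)
      let left := (PySem.List.slice cols none (some (x + 1))).reverse   -- cols[:x+1][::-1]
      let right := PySem.List.slice cols (some (x + 1)) none            -- cols[x+1:]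
      ((left.zip right).map (fun p => bvsHam p.1 p.2)).sum
    else 0
  ((diff : Int) == smudges)

-- ===== PRECONDITION & SPEC =====
-- Pre_ excludes inputs where Python A raises IndexError: the empty grid (grid[0]), and ragged
-- grids whose short rows make grid[y][x+1+i] out of range for some visited i; on part of the
-- latter A still returns False via its early exit while B (whose zip(*grid) truncates to the
-- shortest row) computes a truncated mismatch count, so the whole ragged visited region is
-- excluded rather than matched.
def Pre_is_vertically_symmetric (grid : List String) (x : Int) (smudges : Int) : Prop :=
  grid ≠ [] ∧
    (min (x + 1) (((grid.headD "").length : Int) - x - 1) ≤ 0 ∨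
      ∀ row ∈ grid, x + min (x + 1) (((grid.headD "").length : Int) - x - 1) < (row.length : Int))
instance (grid : List String) (x : Int) (smudges : Int) : Decidable (Pre_is_vertically_symmetric grid x smudges) := by unfold Pre_is_vertically_symmetric; infer_instance

def pvWitness_is_vertically_symmetric : List String × Int × Int := (["#.#", "..."], 0, 1)

def Spec_is_vertically_symmetric (grid : List String) (x : Int) (smudges : Int) (out : Bool) : Prop := out = is_vertically_symmetric_alt grid x smudges
instance (grid : List String) (x : Int) (smudges : Int) (out : Bool) : Decidable (Spec_is_vertically_symmetric grid x smudges out) := by unfold Spec_is_vertically_symmetric; infer_instance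

-- ===== CLAIM (what is proved, stated in full; the proofs are below) =====
def Claim_equal_is_vertically_symmetric : Prop := ∀ (grid : List String) (x : Int) (smudges : Int), Dom_is_vertically_symmetric grid x smudges → Pre_is_vertically_symmetric grid x smudges → Spec_is_vertically_symmetric grid x smudges (is_vertically_symmetric grid x smudges)

-- ===== LEMMAS AND PROOFS =====

-- A's inner loop returns some (s - c) when the row-mismatch count c fits the budget, else none
theorem avsInner_eq (x i : Int) (g : List String) (s : Int) :
    avsInner x i g s =
      if ((g.countP (fun row => avsMismatch row x i)) : Int) ≤ max s 0
      then some (s - (g.countP (fun row => avsMismatch row x i)))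
      else none := by
  induction g generalizing s with
  | nil => simp [avsInner]
  | cons row rest ih =>
    simp only [avsInner, List.countP_cons]
    by_cases h : avsMismatch row x i
    · simp only [h, if_true]
      by_cases hs : s > 0
      · rw [if_pos hs, ih]
        split_ifs with h1 h2 h2 <;> push_cast at * <;> first
          | (congr 1; omega) | omega | rfl
      · rw [if_neg hs]
        rw [if_neg (by push_cast; omega)]
    · simp only [h, ih]
      simp

-- A's whole loop nest: total mismatch count (i-major) against the budget
theorem avsOuter_eq (grid : List String) (x : Int) (L : List Int) (s : Int) :
    avsOuter grid x L s =
      if ((L.map (fun i => grid.countP (fun row => avsMismatch row x i))).sum : Int) ≤ max s 0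
      then some (s - ((L.map (fun i => grid.countP (fun row => avsMismatch row x i))).sum))
      else none := by
  induction L generalizing s with
  | nil => simp [avsOuter]
  | cons i is ih =>
    simp only [avsOuter, avsInner_eq, List.map_cons, List.sum_cons]
    split_ifs with h1 h2 h2 <;>
      simp only [Option.bind, ih] <;>
      (try split_ifs with h3) <;>
      simp only [Nat.cast_add] at * <;>
      first | (congr 1; omega) | omega

-- a nonempty list of rows has a shortest row
theorem exists_min_len (rows : List (List Char)) (h : rows ≠ []) :
    ∃ L : Nat, (∀ r ∈ rows, L ≤ r.length) ∧ ∃ r ∈ rows, r.length = L := by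
  induction rows with
  | nil => exact absurd rfl h
  | cons r rs ih =>
    cases rs with
    | nil => exact ⟨r.length, by simp⟩
    | cons q qs =>
      obtain ⟨L, hle, t, ht, hteq⟩ := ih (by simp)
      refine ⟨min r.length L, ?_, ?_⟩
      · intro u hu
        rcases List.mem_cons.mp hu with h1 | h1
        · subst h1; omega
        · have := hle u h1; omega
      · by_cases hrl : r.length ≤ L
        · exact ⟨r, List.mem_cons_self .., by omega⟩
        · exact ⟨t, List.mem_cons_of_mem _ ht, by omega⟩

-- r.tail.getD j = r.getD (j+1)
theorem tail_getD (r : List Char) (j : Nat) : r.tail.getD j ' ' = r.getD (j + 1) ' ' := by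
  cases r <;> simp [List.getD]

-- bvsCols computed on rows of minimum length L is the list of the L columns
theorem bvsCols_char (L : Nat) : ∀ (rows : List (List Char)), rows ≠ [] →
    (∀ r ∈ rows, L ≤ r.length) → (∃ r ∈ rows, r.length = L) →
    bvsCols rows = (List.range L).map (fun j => rows.map (fun r => r.getD j ' ')) := by
  induction L with
  | zero =>
    intro rows hne _ ⟨r, hr, hrl⟩
    rw [bvsCols]
    rw [dif_pos (Or.inr (List.any_eq_true.mpr ⟨r, hr, by simp [List.length_eq_zero_iff.mp hrl]⟩))]
    simp
  | succ L ih =>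
    intro rows hne hle hex
    have hnonempty : ∀ r ∈ rows, ¬ r.isEmpty := by
      intro r hr
      have := hle r hr
      simp only [List.isEmpty_iff]
      intro e; subst e; simp at this
    rw [bvsCols, dif_neg (by
      rintro (e | hany)
      · exact hne e
      · obtain ⟨r, hr, he⟩ := List.any_eq_true.mp hany
        exact hnonempty r hr he)]
    rw [ih (rows.map List.tail) (by simpa using hne)
      (by
        intro t ht
        obtain ⟨r, hr, rfl⟩ := List.mem_map.mp ht
        have := hle r hr
        simp [List.length_tail]; omega)
      (by
        obtain ⟨r, hr, hrl⟩ := hex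
        exact ⟨r.tail, List.mem_map_of_mem hr, by simp [List.length_tail, hrl]⟩)]
    rw [List.range_succ_eq_map]
    simp only [List.map_cons, List.map_map]
    congr 1
    · refine List.map_congr_left ?_
      intro r hr
      have := hnonempty r hr
      cases r with
      | nil => simp at this
      | cons a t => simp [List.getD]
    · refine List.map_congr_left ?_
      intro j _
      simp only [Function.comp]
      refine List.map_congr_left ?_
      intro r _
      exact tail_getD r j
  
-- zip of two range-maps
theorem zip_map_range {α β : Type} (a b : Nat) (f : Nat → α) (g : Nat → β) :
    ((List.range a).map f).zip ((List.range b).map g)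
      = (List.range (min a b)).map (fun j => (f j, g j)) := by
  apply List.ext_getElem
  · simp
  · intro n h1 h2
    simp_all

-- mismatch count of two columns drawn from the same rows is a countP over the rows
theorem bvsHam_cols (rows : List (List Char)) (a b : Nat) :
    bvsHam (rows.map (fun r => r.getD a ' ')) (rows.map (fun r => r.getD b ' '))
      = rows.countP (fun r => r.getD a ' ' ≠ r.getD b ' ') := by
  unfold bvsHam
  rw [List.zip_map']
  rw [List.countP_eq_length_filter, List.filter_map, List.length_map]
  simp [Function.comp_def]

-- in-range string indexing reduced to getD
theorem pyGet?_getD (xs : List Char) (i : Int) (h : 0 ≤ i) (h2 : i < xs.length) :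
    PySem.List.pyGet? xs i = some (xs.getD i.toNat ' ') := by
  simp [PySem.List.pyGet?, PySem.List.pyIdx?, List.getD_eq_getElem?_getD, h, h2]

-- the common mismatch total both programs are compared against
def mvsCount (grid : List String) (x : Int) (wN : Nat) : Nat :=
  ((List.range wN).map (fun j => (grid.map String.toList).countP
      (fun r => decide (r.getD (x.toNat - j) ' ' ≠ r.getD (x.toNat + 1 + j) ' ')))).sum

-- B evaluated on a rectangular-enough grid with a positive fold width
theorem alt_eval (grid : List String) (x s : Int) (hg : grid ≠ [])
    (hw : 0 < min (x + 1) (((grid.headD "").length : Int) - x - 1))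
    (hrows : ∀ row ∈ grid, x + min (x + 1) (((grid.headD "").length : Int) - x - 1) < (row.length : Int)) :
    is_vertically_symmetric_alt grid x s =
      (((mvsCount grid x (min (x + 1) (((grid.headD "").length : Int) - x - 1)).toNat : Int)) == s) := by
  set W0 : Int := ((grid.headD "").length : Int) with hW0
  set w : Int := min (x + 1) (W0 - x - 1) with hwdef
  have hx : 0 ≤ x := by omega
  have hW0pos : 0 < W0 - x - 1 := by omega
  -- the minimum row length L of the grid
  obtain ⟨L, hLle, r0, hr0, hr0len⟩ := exists_min_len (grid.map String.toList) (by simpa using hg)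
  have hLgt : x + w < (L : Int) := by
    obtain ⟨row, hrow, rfl⟩ := List.mem_map.mp hr0
    have := hrows row hrow
    rw [String.length_toList] at hr0len
    omega
  have hLleW0 : (L : Int) ≤ W0 := by
    cases grid with
    | nil => exact absurd rfl hg
    | cons g gs =>
      have h1 : L ≤ g.toList.length := hLle g.toList (by simp)
      have h2 : (g.toList.length : Int) = W0 := by
        rw [hW0]
        simp [String.length_toList]
      omega
  simp only [is_vertically_symmetric_alt]
  rw [if_pos (show grid ≠ [] ∧ 0 ≤ x ∧ x < ((grid.headD "").length : Int) - 1 from ⟨hg, hx, by omega⟩)]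
  rw [bvsCols_char L (grid.map String.toList) (by simpa using hg) hLle ⟨r0, hr0, hr0len⟩]
  rw [PySem.List.slice_to _ (by omega), PySem.List.slice_from _ (by omega)]
  have hxL : (x + 1).toNat ≤ L := by omega
  have hrev : (List.range (x + 1).toNat).reverse
      = (List.range (x + 1).toNat).map (fun i => (x + 1).toNat - 1 - i) := by
    rw [List.range_eq_range', List.reverse_range', ← List.range_eq_range']
    refine List.map_congr_left ?_
    intro j _
    omega
  have hdrop : (List.range L).drop (x + 1).toNat
      = (List.range (L - (x + 1).toNat)).map (fun j => (x + 1).toNat + j) := by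
    rw [List.range_eq_range', List.drop_range', List.range'_eq_map_range]
    refine List.map_congr_left ?_
    intro j _
    omega
  rw [← List.map_take, ← List.map_drop, List.take_range, min_eq_left hxL,
      ← List.map_reverse, hrev, hdrop, List.map_map, List.map_map, zip_map_range]
  have hminw : min (x + 1).toNat (L - (x + 1).toNat) = w.toNat := by omega
  rw [hminw, List.map_map]
  congr 2
  unfold mvsCount
  refine congrArg (List.sum (α := ℕ)) (List.map_congr_left ?_)
  intro j hj
  have hjw : j < w.toNat := by simpa using hj
  simp only [Function.comp]
  have h1 : (x + 1).toNat - 1 - j = x.toNat - j := by omega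
  have h2 : (x + 1).toNat + j = x.toNat + 1 + j := by omega
  rw [h1, h2, bvsHam_cols]

-- A evaluated against the same mismatch total
theorem a_eval (grid : List String) (x s : Int) (_hg : grid ≠ [])
    (hw : 0 < min (x + 1) (((grid.headD "").length : Int) - x - 1))
    (hrows : ∀ row ∈ grid, x + min (x + 1) (((grid.headD "").length : Int) - x - 1) < (row.length : Int)) :
    is_vertically_symmetric grid x s =
      (if ((mvsCount grid x (min (x + 1) (((grid.headD "").length : Int) - x - 1)).toNat : Int)) ≤ max s 0
       then ((s - (mvsCount grid x (min (x + 1) (((grid.headD "").length : Int) - x - 1)).toNat : Int)) == 0)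
       else false) := by
  set W0 : Int := ((grid.headD "").length : Int) with hW0
  set w : Int := min (x + 1) (W0 - x - 1) with hwdef
  have hx : 0 ≤ x := by omega
  simp only [is_vertically_symmetric]
  rw [avsOuter_eq]
  have hm : ((PySem.List.pyRange 0 w 1).map (fun i => grid.countP (fun row => avsMismatch row x i))).sum
      = mvsCount grid x w.toNat := by
    rw [PySem.List.pyRange_one, List.map_map]
    unfold mvsCount
    have hsub : (w - 0).toNat = w.toNat := by omega
    rw [hsub]
    refine congrArg List.sum (List.map_congr_left ?_)
    intro j hj
    have hjw : j < w.toNat := by simpa using hj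
    simp only [Function.comp]
    rw [List.countP_map]
    refine List.countP_congr ?_
    intro row hrow
    have hlen : x + w < (row.toList.length : Int) := by
      have := hrows row hrow
      rw [← String.length_toList] at this
      exact this
    simp only [Function.comp]
    unfold avsMismatch
    have hg1 : PySem.Str.pyGet? row (x - (0 + (j : Int))) = some (row.toList.getD (x.toNat - j) ' ') := by
      have : PySem.Str.pyGet? row (x - (0 + (j : Int))) = PySem.List.pyGet? row.toList (x - (0 + (j : Int))) := by
        simp [PySem.Str.pyGet?]
      rw [this, pyGet?_getD _ _ (by omega) (by omega)]
      congr 1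
      congr 1
      omega
    have hg2 : PySem.Str.pyGet? row (x + 1 + (0 + (j : Int))) = some (row.toList.getD (x.toNat + 1 + j) ' ') := by
      have : PySem.Str.pyGet? row (x + 1 + (0 + (j : Int))) = PySem.List.pyGet? row.toList (x + 1 + (0 + (j : Int))) := by
        simp [PySem.Str.pyGet?]
      rw [this, pyGet?_getD _ _ (by omega) (by omega)]
      congr 1
      congr 1
      omega
    rw [hg1, hg2]
    simp [bne]
  rw [hm]
  split_ifs with h1 <;> rfl

-- ===== VERDICT (by name: the statement is the Claim_ definition above) =====
theorem is_vertically_symmetric_spec : Claim_equal_is_vertically_symmetric := by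
  intro grid x smudges _ hpre
  obtain ⟨hgne, hpre2⟩ := hpre
  unfold Spec_is_vertically_symmetric
  by_cases hw : min (x + 1) (((grid.headD "").length : Int) - x - 1) ≤ 0
  · -- empty fold width: A returns smudges == 0, B returns 0 == smudges
    simp only [is_vertically_symmetric, is_vertically_symmetric_alt]
    rw [PySem.List.pyRange_one_eq_nil (by omega)]
    rw [if_neg (by rintro ⟨-, hx0, hxW⟩; omega)]
    simp only [avsOuter]
    rw [Bool.eq_iff_iff]
    simp only [beq_iff_eq, Nat.cast_zero]
    omega
  · have hrows := hpre2.resolve_left hw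
    rw [a_eval grid x smudges hgne (by omega) hrows,
        alt_eval grid x smudges hgne (by omega) hrows]
    rw [Bool.eq_iff_iff]
    split_ifs with h1 <;> simp only [beq_iff_eq, false_iff] <;> omega
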